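-- pv_equiv track=rewrite | github.com/pudg/99-Problems | python/twenty/twenty.py | sales_match
-- ===== SOURCE A (Python) =====
-- def sales_match(nums):
--     from collections import defaultdict
--     count = 0
--     freqs = defaultdict(int)
--
--     for num in nums:
--         freqs[num] += 1
--         if freqs[num] % 2 == 0:
--             count += 1
--
--     return count
-- ===== SOURCE B (Python) =====
-- def sales_match(nums):
--     s = sorted(nums)
--     count = 0
--     i = 0
--     while i + 1 < len(s):
--         if s[i] == s[i + 1]:
--             count += 1
--             i += 2
--         else:
--             i += 1
--     return count
-- ===== Notes on version B (the rewrite author's own statement) =====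
-- stated objective: alternative
-- what changed: Replaces A's hash-map streaming parity count with sort-then-scan: sort the list so equal values are adjacent, then walk it pairing adjacent equal elements (advance by 2 on a pair, by 1 otherwise) with no frequency table at all.
import Mathlib
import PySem

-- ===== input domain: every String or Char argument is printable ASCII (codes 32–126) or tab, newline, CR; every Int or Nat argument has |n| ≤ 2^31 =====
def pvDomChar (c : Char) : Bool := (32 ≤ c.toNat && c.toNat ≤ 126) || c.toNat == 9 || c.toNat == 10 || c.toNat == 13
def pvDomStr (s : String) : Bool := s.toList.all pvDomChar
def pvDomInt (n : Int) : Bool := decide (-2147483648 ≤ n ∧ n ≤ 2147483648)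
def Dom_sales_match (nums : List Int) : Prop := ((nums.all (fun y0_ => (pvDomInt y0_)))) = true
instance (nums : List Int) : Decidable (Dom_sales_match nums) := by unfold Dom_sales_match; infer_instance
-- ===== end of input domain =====

-- B sorts the list and pairs adjacent equal elements in one scan (no frequency table); A streams a hash map with a parity check. Objective: alternative.

-- ===== PORT A =====
def sales_match (nums : List Int) : Int :=
  (nums.foldl
    (fun (st : Int × PySem.Dict Int Int) num =>
      let freqs := st.2.modify num 0 (· + 1)
      (if PySem.Int.mod (freqs.getD num 0) 2 == 0 then st.1 + 1 else st.1, freqs))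
    (0, PySem.Dict.empty)).1

-- ===== PORT B =====
-- Source B's while loop over index i on the sorted list, as the obvious structural
-- recursion on the suffix s[i:] (advance by 2 on an adjacent equal pair, else by 1)
def pvScan : List Int → Int
  | a :: b :: rest => if a == b then 1 + pvScan rest else pvScan (b :: rest)
  | _ => 0

def sales_match_alt (nums : List Int) : Int :=
  pvScan (PySem.List.sorted nums (fun x => x) false)

-- ===== PRECONDITION & SPEC =====
def Spec_sales_match (nums : List Int) (out : Int) : Prop := out = sales_match_alt nums
instance (nums : List Int) (out : Int) : Decidable (Spec_sales_match nums out) := by unfold Spec_sales_match; infer_instance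

-- ===== CLAIM (what is proved, stated in full; the proofs are below) =====
def Claim_equal_sales_match : Prop := ∀ (nums : List Int), Dom_sales_match nums → Spec_sales_match nums (sales_match nums)

-- ===== LEMMAS AND PROOFS =====

-- common closed form: sum over the distinct values of ⌊count/2⌋
def pvSsum (nums : List Int) : Int :=
  ((PySem.Set.ofList nums).map (fun k => ((nums.count k : Int)) / 2)).sum

-- the dict component of A's fold is exactly the counter fold
theorem pv_snd_fold (l : List Int) (cnt : Int) (d : PySem.Dict Int Int) :
    (l.foldl
      (fun (st : Int × PySem.Dict Int Int) num =>
        let freqs := st.2.modify num 0 (· + 1)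
        (if PySem.Int.mod (freqs.getD num 0) 2 == 0 then st.1 + 1 else st.1, freqs))
      (cnt, d)).2 = l.foldl (fun d x => d.modify x 0 (· + 1)) d := by
  induction l generalizing cnt d with
  | nil => rfl
  | cons a l ih => exact ih _ _

-- replacing f by g at one element of a nodup list shifts the sum by f x - g x
theorem pv_sum_update (s : List Int) (f g : Int → Int) (x : Int)
    (hnd : s.Nodup) (hx : x ∈ s) (hfg : ∀ k ∈ s, k ≠ x → f k = g k) :
    (s.map f).sum = (s.map g).sum + (f x - g x) := by
  induction s with
  | nil => cases hx
  | cons a s ih =>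
    rcases List.mem_cons.mp hx with h | h
    · subst h
      have : ∀ k ∈ s, f k = g k := fun k hk =>
        hfg k (List.mem_cons_of_mem _ hk) (fun he => (List.nodup_cons.mp hnd).1 (he ▸ hk))
      simp [List.map_congr_left this]; ring
    · have ha : f a = g a := hfg a (List.mem_cons_self) (fun he => (List.nodup_cons.mp hnd).1 (he ▸ h))
      have := ih (List.nodup_cons.mp hnd).2 h (fun k hk => hfg k (List.mem_cons_of_mem _ hk))
      simp [this, ha]; ring

theorem pv_ssum_append (ns : List Int) (x : Int) :
    pvSsum (ns ++ [x]) = pvSsum ns + (if ((ns.count x : Int) + 1) % 2 = 0 then 1 else 0) := by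
  have hset : PySem.Set.ofList (ns ++ [x]) = PySem.Set.add (PySem.Set.ofList ns) x := by
    simp [PySem.Set.ofList, List.foldl_append]
  by_cases hx : x ∈ ns
  · have hmem : x ∈ PySem.Set.ofList ns := (PySem.Set.mem_ofList ns x).mpr hx
    have hadd : PySem.Set.add (PySem.Set.ofList ns) x = PySem.Set.ofList ns := by
      simp [PySem.Set.add, PySem.Set.contains, hmem]
    have hc : 1 ≤ ns.count x := List.one_le_count_iff.mpr hx
    have hupd := pv_sum_update (PySem.Set.ofList ns)
      (fun k => (((ns ++ [x]).count k : Int)) / 2)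
      (fun k => ((ns.count k : Int)) / 2) x
      (PySem.Set.nodup_ofList ns) hmem
      (by
        intro k hk hne
        simp [List.count_append, Ne.symm hne])
    have hcx : ((ns ++ [x]).count x : Int) = (ns.count x : Int) + 1 := by
      simp [List.count_append]
    simp only [hcx] at hupd
    rw [pvSsum, hset, hadd, hupd, pvSsum]
    split_ifs with h <;> omega
  · have hmem : x ∉ PySem.Set.ofList ns := fun h => hx ((PySem.Set.mem_ofList ns x).mp h)
    have hadd : PySem.Set.add (PySem.Set.ofList ns) x = PySem.Set.ofList ns ++ [x] := by
      simp [PySem.Set.add, PySem.Set.contains, hmem]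
    have hc0 : ns.count x = 0 := List.count_eq_zero.mpr hx
    have hcong : ∀ k ∈ PySem.Set.ofList ns,
        (((ns ++ [x]).count k : Int)) / 2 = ((ns.count k : Int)) / 2 := by
      intro k hk
      have hkx : k ≠ x := fun he => hx (he ▸ (PySem.Set.mem_ofList ns k).mp hk)
      simp [List.count_append, Ne.symm hkx]
    rw [pvSsum, hset, hadd]
    rw [List.map_append, List.sum_append, List.map_congr_left hcong]
    have hcx : ((ns ++ [x]).count x : Int) = 1 := by
      simp [List.count_append, hc0]
    simp [pvSsum, hc0]

theorem pv_a_eq (nums : List Int) : sales_match nums = pvSsum nums := by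
  induction nums using List.reverseRecOn with
  | nil => simp [sales_match, pvSsum, PySem.Set.ofList]
  | append_singleton ns x ih =>
    have hfold : (ns.foldl
        (fun (st : Int × PySem.Dict Int Int) num =>
          let freqs := st.2.modify num 0 (· + 1)
          (if PySem.Int.mod (freqs.getD num 0) 2 == 0 then st.1 + 1 else st.1, freqs))
        (0, PySem.Dict.empty)) = (sales_match ns, PySem.Dict.counter ns) := by
      rw [Prod.ext_iff]
      exact ⟨rfl, by rw [pv_snd_fold]; rw [PySem.Dict.counter_eq_foldl]⟩
    rw [sales_match, List.foldl_append, hfold]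
    have hget : ((PySem.Dict.counter ns).modify x 0 (· + 1)).getD x 0
        = (ns.count x : Int) + 1 := by
      rw [PySem.Dict.getD_modify_self, PySem.Dict.getD_counter]
    have hmod : PySem.Int.mod ((ns.count x : Int) + 1) 2 = ((ns.count x : Int) + 1) % 2 :=
      PySem.Int.mod_eq_emod_of_pos (by norm_num)
    rw [pv_ssum_append, ← ih]
    simp only [List.foldl_cons, List.foldl_nil, hget, hmod]
    by_cases h : ((ns.count x : Int) + 1) % 2 = 0 <;> simp [h]

-- scanning a block of n equal elements followed by a list not starting with a yields n/2 pairs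
theorem pv_scan_replicate (n : Nat) (a : Int) (r : List Int) (hr : a ∉ r) :
    pvScan (List.replicate n a ++ r) = (n : Int) / 2 + pvScan r := by
  induction n using Nat.strong_induction_on with
  | _ n ih =>
    match n with
    | 0 => simp
    | 1 =>
      cases r with
      | nil => simp [pvScan]
      | cons b r' =>
        have hb : (a == b) = false := by
          simp only [beq_eq_false_iff_ne]
          exact fun he => hr (he ▸ List.mem_cons_self)
        simp [pvScan, hb]
    | (m + 2) =>
      have : List.replicate (m + 2) a ++ r = a :: a :: (List.replicate m a ++ r) := by
        simp [List.replicate_succ]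
      rw [this]
      have hrec := ih m (by omega)
      simp only [pvScan, beq_self_eq_true, if_true, hrec]
      have : ((m : Int) + 2) / 2 = (m : Int) / 2 + 1 := by omega
      push_cast
      omega

-- in a sorted list whose elements all dominate a, the copies of a form a prefix
theorem pv_sorted_decomp (a : Int) (t : List Int)
    (ht : t.Pairwise (· ≤ ·)) (hge : ∀ x ∈ t, a ≤ x) :
    t = List.replicate (t.count a) a ++ t.filter (fun x => !(x == a)) := by
  induction t with
  | nil => simp
  | cons b t' ih =>
    have ht' : t'.Pairwise (· ≤ ·) := (List.pairwise_cons.mp ht).2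
    by_cases hb : b = a
    · subst hb
      have hge' : ∀ x ∈ t', b ≤ x := fun x hx => hge x (List.mem_cons_of_mem _ hx)
      have := ih ht' hge'
      simp [List.replicate_succ]
      exact this
    · have hab : a < b := lt_of_le_of_ne (hge b List.mem_cons_self) (Ne.symm hb)
      have hne : ∀ x ∈ b :: t', x ≠ a := by
        intro x hx
        rcases List.mem_cons.mp hx with h | h
        · exact h ▸ hb
        · exact fun he => absurd ((List.pairwise_cons.mp ht).1 x h) (by omega)
      have hc0 : (b :: t').count a = 0 := by
        refine List.count_eq_zero.mpr ?_
        exact fun hmem => (hne a hmem) rfl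
      have hf : (b :: t').filter (fun x => !(x == a)) = b :: t' := by
        refine List.filter_eq_self.mpr ?_
        intro x hx
        simp [hne x hx]
      rw [hc0, hf]
      simp

-- pvSsum over a block of n≥1 copies of a followed by r with a ∉ r
theorem pv_ssum_block (n : Nat) (hn : 1 ≤ n) (a : Int) (r : List Int) (hr : a ∉ r) :
    pvSsum (List.replicate n a ++ r) = (n : Int) / 2 + pvSsum r := by
  set l := List.replicate n a ++ r with hl
  have hn0 : n ≠ 0 := by omega
  have hmem : ∀ x, x ∈ l ↔ x = a ∨ x ∈ r := by
    intro x
    simp [hl, List.mem_replicate, hn0]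
  have hperm : (PySem.Set.ofList l).Perm (a :: PySem.Set.ofList r) := by
    refine (List.perm_ext_iff_of_nodup (PySem.Set.nodup_ofList l) ?_).mpr ?_
    · refine List.nodup_cons.mpr ⟨fun h => hr ((PySem.Set.mem_ofList r a).mp h), PySem.Set.nodup_ofList r⟩
    · intro x
      rw [PySem.Set.mem_ofList, hmem, List.mem_cons, PySem.Set.mem_ofList]
  have hcr : r.count a = 0 := List.count_eq_zero.mpr hr
  have hca : l.count a = n := by
    simp [hl, List.count_append, hcr]
  have hck : ∀ k ∈ PySem.Set.ofList r, l.count k = r.count k := by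
    intro k hk
    have hka : k ≠ a := fun he => hr (he ▸ (PySem.Set.mem_ofList r k).mp hk)
    simp [hl, List.count_append, List.count_replicate, Ne.symm hka]
  calc pvSsum l
      = ((a :: PySem.Set.ofList r).map (fun k => ((l.count k : Int)) / 2)).sum := by
        rw [pvSsum]
        exact (hperm.map _).sum_eq
    _ = (n : Int) / 2 + pvSsum r := by
        rw [List.map_cons, List.sum_cons, hca, pvSsum]
        congr 1
        refine congrArg List.sum ?_
        exact List.map_congr_left (fun k hk => by rw [hck k hk])

-- the scan of any sorted list computes pvSsum
theorem pv_scan_sorted : ∀ (N : Nat) (s : List Int), s.length ≤ N →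
    s.Pairwise (· ≤ ·) → pvScan s = pvSsum s := by
  intro N
  induction N with
  | zero =>
    intro s hlen _
    have : s = [] := List.eq_nil_of_length_eq_zero (Nat.le_zero.mp hlen)
    subst this
    simp [pvScan, pvSsum, PySem.Set.ofList]
  | succ N ih =>
    intro s hlen hs
    cases s with
    | nil => simp [pvScan, pvSsum, PySem.Set.ofList]
    | cons a t =>
      have ht : t.Pairwise (· ≤ ·) := (List.pairwise_cons.mp hs).2
      have hge : ∀ x ∈ t, a ≤ x := (List.pairwise_cons.mp hs).1
      set r := t.filter (fun x => !(x == a)) with hrdef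
      have hdec : a :: t = List.replicate (t.count a + 1) a ++ r := by
        rw [List.replicate_succ]
        simpa using congrArg (a :: ·) (pv_sorted_decomp a t ht hge)
      have har : a ∉ r := by
        intro h
        have := List.of_mem_filter h
        simp at this
      have hrsorted : r.Pairwise (· ≤ ·) := ht.sublist List.filter_sublist
      have hrlen : r.length ≤ N := by
        have h1 : r.length ≤ t.length := List.length_filter_le _ _
        have h2 : t.length ≤ N := by simpa using Nat.lt_succ_iff.mp (Nat.lt_of_lt_of_le (by simp) hlen)
        omega
      rw [hdec, pv_scan_replicate _ _ _ har, pv_ssum_block _ (by omega) _ _ har,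
          ih r hrlen hrsorted]

theorem pv_alt_eq (nums : List Int) : sales_match_alt nums = pvSsum nums := by
  rw [sales_match_alt]
  have hsorted : (PySem.List.sorted nums (fun x => x) false).Pairwise (· ≤ ·) := by
    simpa using PySem.List.sorted_pairwise nums (fun x => x)
  have hperm : (PySem.List.sorted nums (fun x => x) false).Perm nums :=
    PySem.List.sorted_perm nums (fun x => x) false
  rw [pv_scan_sorted (PySem.List.sorted nums (fun x => x) false).length _ le_rfl hsorted]
  -- pvSsum is permutation-invariant
  have hsetperm : (PySem.Set.ofList (PySem.List.sorted nums (fun x => x) false)).Perm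
      (PySem.Set.ofList nums) := by
    refine (List.perm_ext_iff_of_nodup (PySem.Set.nodup_ofList _) (PySem.Set.nodup_ofList _)).mpr ?_
    intro x
    rw [PySem.Set.mem_ofList, PySem.Set.mem_ofList]
    exact hperm.mem_iff
  rw [pvSsum, pvSsum]
  have hcnt : ∀ k, (PySem.List.sorted nums (fun x => x) false).count k = nums.count k :=
    fun k => hperm.count_eq k
  calc ((PySem.Set.ofList (PySem.List.sorted nums (fun x => x) false)).map
          (fun k => (((PySem.List.sorted nums (fun x => x) false).count k : Int)) / 2)).sum
      = ((PySem.Set.ofList (PySem.List.sorted nums (fun x => x) false)).map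
          (fun k => ((nums.count k : Int)) / 2)).sum := by
        refine congrArg List.sum (List.map_congr_left ?_)
        intro k _
        rw [hcnt k]
    _ = ((PySem.Set.ofList nums).map (fun k => ((nums.count k : Int)) / 2)).sum :=
        (hsetperm.map _).sum_eq

-- ===== VERDICT (by name: the statement is the Claim_ definition above) =====
theorem sales_match_spec : Claim_equal_sales_match := by
  intro nums _
  unfold Spec_sales_match
  rw [pv_a_eq, pv_alt_eq]
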